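-- pv_equiv track=rewrite | github.com/2024-2-analitica-descriptiva/2024-2-LAB-01-programacion-basica-en-python-jfyusty | homework/pregunta_08.py | reduce_function
-- ===== SOURCE A (Python) =====
-- def reduce_function(mapped_data):
--     reduce_dict = {}    # Inicializa un diccionario vacío para almacenar los resultados reducidos.
--     for number, letter in mapped_data:  # Itera sobre cada tupla (número, letra) en la lista de datos mapeados.
--         if number in reduce_dict:    # Comprueba si el número ya existe en el diccionario.
--             reduce_dict[number].add(letter)  # Si el número existe, añade la letra a la lista existente de letras asociadas con ese número.
--             # Usar un conjunto evita duplicados y solo conserva valores únicos.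
--         else:
--             reduce_dict[number] = {letter}  # Si el número no existe en el diccionario, crea una nueva entrada con el número como clave e inicializa el valor como un conjunto que contiene la letra.
--             # Un conjunto se inicializa con `{letter}` para garantizar que futuras adiciones sean únicas.
--     return reduce_dict  # Retorna el diccionario que contiene los números con sus respectivas listas de letras asociadas.
-- ===== SOURCE B (Python) =====
-- def reduce_function(mapped_data):
--     # For each number (first-occurrence order), rescan the whole input to
--     # collect the set of its letters: nested repeated passes instead of one
--     # incrementally-updated dict.
--     return {n: {l for m, l in mapped_data if m == n} for n, _ in mapped_data}
-- ===== Notes on version B (the rewrite author's own statement) =====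
-- stated objective: idiomatic
-- what changed: Replaces the incremental single-pass dict/set accumulation with a dict comprehension that, for each key, rescans the whole input to build its letter set in one expression.
import Mathlib
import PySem

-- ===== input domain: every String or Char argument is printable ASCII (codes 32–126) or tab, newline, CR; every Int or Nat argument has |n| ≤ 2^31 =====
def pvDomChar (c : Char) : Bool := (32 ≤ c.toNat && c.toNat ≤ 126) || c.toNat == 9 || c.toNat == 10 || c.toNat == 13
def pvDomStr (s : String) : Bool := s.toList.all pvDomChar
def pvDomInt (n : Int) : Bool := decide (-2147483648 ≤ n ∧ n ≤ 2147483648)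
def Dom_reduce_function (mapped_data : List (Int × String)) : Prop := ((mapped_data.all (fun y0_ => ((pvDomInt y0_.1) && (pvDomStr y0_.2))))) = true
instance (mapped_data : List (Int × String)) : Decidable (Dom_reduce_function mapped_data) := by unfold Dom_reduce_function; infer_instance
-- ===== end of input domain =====

-- B replaces A's incremental single-pass dict/set accumulation by a dict
-- comprehension that rescans the whole input once per key (idiomatic one-liner;
-- not faster).

-- ===== PORT A =====
def reduce_function (mapped_data : List (Int × String)) : List (Int × List String) :=
  (mapped_data.foldl
    (fun reduce_dict p =>
      if reduce_dict.contains p.1 then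
        reduce_dict.modify p.1 PySem.Set.empty (fun s => PySem.Set.add s p.2)
      else
        reduce_dict.insert p.1 (PySem.Set.ofList [p.2]))
    PySem.Dict.empty).items

-- ===== PORT B =====
def reduce_function_alt (mapped_data : List (Int × String)) : List (Int × List String) :=
  (mapped_data.foldl
    (fun d p =>
      d.insert p.1 (PySem.Set.ofList ((mapped_data.filter (fun q => q.1 == p.1)).map (·.2))))
    PySem.Dict.empty).items

-- ===== PRECONDITION & SPEC =====
def Spec_reduce_function (mapped_data : List (Int × String)) (out : List (Int × List String)) : Prop := out = reduce_function_alt mapped_data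
instance (mapped_data : List (Int × String)) (out : List (Int × List String)) : Decidable (Spec_reduce_function mapped_data out) := by unfold Spec_reduce_function; infer_instance

-- ===== CLAIM (what is proved, stated in full; the proofs are below) =====
def Claim_equal_reduce_function : Prop := ∀ (mapped_data : List (Int × String)), Dom_reduce_function mapped_data → Spec_reduce_function mapped_data (reduce_function mapped_data)

-- ===== LEMMAS AND PROOFS =====

-- A's loop body, named for the proofs.
def pvStepA (d : PySem.Dict Int (List String)) (p : Int × String) : PySem.Dict Int (List String) :=
  if d.contains p.1 then
    d.modify p.1 PySem.Set.empty (fun s => PySem.Set.add s p.2)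
  else
    d.insert p.1 (PySem.Set.ofList [p.2])

theorem pvStepA_getD (d : PySem.Dict Int (List String)) (p : Int × String) (k : Int) :
    (pvStepA d p).getD k [] = if k = p.1 then PySem.Set.add (d.getD k []) p.2 else d.getD k [] := by
  unfold pvStepA
  by_cases hc : d.contains p.1
  · rw [if_pos hc]
    simp only [PySem.Set.empty]
    rw [PySem.Dict.getD_modify]
    split_ifs with h
    · subst h; rfl
    · rfl
  · simp only [Bool.not_eq_true] at hc
    rw [if_neg (by simp [hc])]
    rw [PySem.Dict.getD_insert]
    by_cases hk : k = p.1
    · subst hk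
      rw [PySem.Dict.getD_of_not_contains _ _ hc]
      simp [PySem.Set.ofList, PySem.Set.add, PySem.Set.contains, PySem.Set.empty]
    · simp [hk]

theorem pvStepA_keys (d : PySem.Dict Int (List String)) (p : Int × String) :
    (pvStepA d p).keys = PySem.Set.add d.keys p.1 := by
  unfold pvStepA
  by_cases hc : d.contains p.1
  · rw [if_pos hc, PySem.Dict.keys_modify, PySem.Dict.keys_insert_of_contains _ _ hc]
    have hs : p.1 ∈ d.keys := by
      simpa [PySem.Dict.contains_eq_decide_mem_keys] using hc
    simp [PySem.Set.add, PySem.Set.contains, hs]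
  · simp only [Bool.not_eq_true] at hc
    rw [if_neg (by simp [hc]), PySem.Dict.keys_insert_of_not_contains _ _ hc]
    have hs : p.1 ∉ d.keys := by
      simpa [PySem.Dict.contains_eq_decide_mem_keys] using hc
    simp [PySem.Set.add, PySem.Set.contains, hs]

theorem pvFoldA_getD (l : List (Int × String)) (d : PySem.Dict Int (List String)) (k : Int) :
    (l.foldl pvStepA d).getD k [] =
      PySem.Set.update (d.getD k []) ((l.filter (fun q => q.1 == k)).map (·.2)) := by
  induction l generalizing d with
  | nil => simp [PySem.Set.update]
  | cons p l ih =>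
    rw [List.foldl_cons, ih, pvStepA_getD]
    by_cases hk : k = p.1
    · simp [hk, PySem.Set.update]
    · simp [hk, Ne.symm hk]

theorem pvFoldA_keys (l : List (Int × String)) (d : PySem.Dict Int (List String)) :
    (l.foldl pvStepA d).keys = PySem.Set.update d.keys (l.map (·.1)) := by
  induction l generalizing d with
  | nil => simp [PySem.Set.update]
  | cons p l ih => rw [List.foldl_cons, ih, pvStepA_keys]; simp [PySem.Set.update]

theorem pvFoldB_getD (md l : List (Int × String)) (d : PySem.Dict Int (List String)) (k : Int) :
    (l.foldl (fun d p =>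
        d.insert p.1 (PySem.Set.ofList ((md.filter (fun q => q.1 == p.1)).map (·.2)))) d).getD k [] =
      if k ∈ l.map (·.1) then PySem.Set.ofList ((md.filter (fun q => q.1 == k)).map (·.2))
      else d.getD k [] := by
  induction l generalizing d with
  | nil => simp
  | cons p l ih =>
    rw [List.foldl_cons, ih, PySem.Dict.getD_insert]
    by_cases hk : k = p.1
    · subst hk; by_cases hm : p.1 ∈ l.map (·.1) <;> simp [hm]
    · by_cases hm : k ∈ l.map (·.1)
      · simp [hm, List.mem_cons]
      · simp [hm, hk, List.mem_cons]

-- ===== VERDICT (by name: the statement is the Claim_ definition above) =====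
theorem reduce_function_spec : Claim_equal_reduce_function := by
  intro md _
  show reduce_function md = reduce_function_alt md
  unfold reduce_function reduce_function_alt
  have hA : (md.foldl
      (fun reduce_dict p =>
        if reduce_dict.contains p.1 then
          reduce_dict.modify p.1 PySem.Set.empty (fun s => PySem.Set.add s p.2)
        else
          reduce_dict.insert p.1 (PySem.Set.ofList [p.2]))
      PySem.Dict.empty) = md.foldl pvStepA PySem.Dict.empty := rfl
  rw [hA]
  have hkA : (md.foldl pvStepA PySem.Dict.empty).keys = PySem.Set.ofList (md.map (·.1)) := by
    rw [pvFoldA_keys]; rfl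
  have hkB : ((md.foldl (fun d p =>
      d.insert p.1 (PySem.Set.ofList ((md.filter (fun q => q.1 == p.1)).map (·.2))))
      PySem.Dict.empty)).keys = PySem.Set.ofList (md.map (·.1)) := by
    rw [PySem.Dict.keys_foldl_insert_key]; rfl
  have hndA : (md.foldl pvStepA PySem.Dict.empty).keys.Nodup := by
    rw [hkA]; exact PySem.Set.nodup_ofList _
  have hndB : ((md.foldl (fun d p =>
      d.insert p.1 (PySem.Set.ofList ((md.filter (fun q => q.1 == p.1)).map (·.2))))
      PySem.Dict.empty)).keys.Nodup := by
    rw [hkB]; exact PySem.Set.nodup_ofList _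
  rw [PySem.Dict.items_eq_map_keys _ hndA [], PySem.Dict.items_eq_map_keys _ hndB [], hkA, hkB]
  apply List.map_congr_left
  intro k hk
  have hmem : k ∈ md.map (·.1) := (PySem.Set.mem_ofList _ _).1 hk
  rw [pvFoldA_getD, pvFoldB_getD, if_pos hmem]
  simp [PySem.Dict.getD_empty, PySem.Set.update, PySem.Set.ofList]
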